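-- pv_equiv track=rewrite | github.com/albabernal03/UEFA_PREDICCION2.0 | webscraping/partidos.py | eliminar_columna_group_stage
-- ===== SOURCE A (Python) =====
-- def eliminar_columna_group_stage(datos_tabla):
--     indices_a_eliminar = [i for i, fila in enumerate(datos_tabla[1:], start=1) if fila[2] == 'group stage']
--     for i in indices_a_eliminar:
--         if len(datos_tabla[i]) > 2:
--             del datos_tabla[i][2]
--         else:
--             datos_tabla[i].insert(2, '')  # Agregar una cadena vacía si la columna no existe
--     return datos_tabla
-- ===== SOURCE B (Python) =====
-- def eliminar_columna_group_stage(datos_tabla):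
--     # Pure reconstruction: builds a NEW table (no in-place mutation; the
--     # equivalence claimed is about the return value). A tagged row is rebuilt
--     # by keeping every column whose index is not 2.
--     def sin_columna(fila):
--         if fila[2] != 'group stage':
--             return fila
--         return [c for j, c in enumerate(fila) if j != 2]
--     return datos_tabla[:1] + [sin_columna(f) for f in datos_tabla[1:]]
-- ===== Notes on version B (the rewrite author's own statement) =====
-- stated objective: alternative
-- what changed: B is a pure functional reconstruction: instead of collecting indices and mutating the table with del (A's else branch being dead code), B returns header + a comprehension that rebuilds each tagged row by keeping the columns whose index is not 2; B never mutates its argument.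
import Mathlib
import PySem

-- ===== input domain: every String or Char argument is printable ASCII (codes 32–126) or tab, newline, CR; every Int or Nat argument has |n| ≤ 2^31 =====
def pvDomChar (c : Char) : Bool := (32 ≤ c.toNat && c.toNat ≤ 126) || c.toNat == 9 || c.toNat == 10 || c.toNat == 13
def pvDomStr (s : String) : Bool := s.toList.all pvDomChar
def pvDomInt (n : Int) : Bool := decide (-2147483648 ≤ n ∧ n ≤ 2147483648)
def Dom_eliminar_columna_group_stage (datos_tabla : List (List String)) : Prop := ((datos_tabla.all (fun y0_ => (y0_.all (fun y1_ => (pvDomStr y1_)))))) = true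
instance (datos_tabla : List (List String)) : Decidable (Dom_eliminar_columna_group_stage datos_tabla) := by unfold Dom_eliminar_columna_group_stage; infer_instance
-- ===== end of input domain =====

-- B is a pure reconstruction (header + comprehension rebuilding tagged rows by index-filter)
-- instead of A's index-list-then-mutate-with-del; equivalence is about the RETURN value only —
-- A mutates datos_tabla in place, B does not.

-- ===== PORT A =====
-- the body of A's second loop: del datos_tabla[i][2] / insert(2, '')
def pvElimFix (row : List String) : List String :=
  if row.length > 2 then row.eraseIdx 2 else PySem.List.insert row 2 ""

def eliminar_columna_group_stage (datos_tabla : List (List String)) : List (List String) :=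
  let indices_a_eliminar : List Int :=
    (PySem.List.enumerate (PySem.List.slice datos_tabla (some 1) none) 1).filterMap
      (fun p => if PySem.List.pyGet? p.2 2 = some "group stage" then some p.1 else none)
  indices_a_eliminar.foldl
    (fun acc i =>
      match PySem.List.pyGet? acc i with
      | some row => PySem.List.pySetD acc i (pvElimFix row)
      | none => acc)    -- unreachable: every collected index is in range
    datos_tabla

-- ===== PORT B =====
-- Source B's helper sin_columna: rebuild the row keeping the columns whose index is not 2
def pvSinColumna (fila : List String) : List String :=
  if PySem.List.pyGet? fila 2 ≠ some "group stage" then fila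
  else (PySem.List.enumerate fila 0).filterMap
        (fun p => if p.1 ≠ 2 then some p.2 else none)

def eliminar_columna_group_stage_alt (datos_tabla : List (List String)) : List (List String) :=
  PySem.List.slice datos_tabla none (some 1)
    ++ (PySem.List.slice datos_tabla (some 1) none).map pvSinColumna

-- ===== PRECONDITION & SPEC =====
-- Pre_ excludes exactly the inputs where both Pythons raise IndexError: a data row
-- (any row after the first) with fewer than 3 entries, on which fila[2] fails.
def Pre_eliminar_columna_group_stage (datos_tabla : List (List String)) : Prop :=
  ∀ fila ∈ datos_tabla.drop 1, 3 ≤ fila.length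
instance (datos_tabla : List (List String)) : Decidable (Pre_eliminar_columna_group_stage datos_tabla) := by unfold Pre_eliminar_columna_group_stage; infer_instance

def pvWitness_eliminar_columna_group_stage : List (List String) :=
  [["h1", "h2"], ["a", "b", "group stage", "x"], ["c", "d", "e"]]

def Spec_eliminar_columna_group_stage (datos_tabla : List (List String)) (out : List (List String)) : Prop := out = eliminar_columna_group_stage_alt datos_tabla
instance (datos_tabla : List (List String)) (out : List (List String)) : Decidable (Spec_eliminar_columna_group_stage datos_tabla out) := by unfold Spec_eliminar_columna_group_stage; infer_instance

-- ===== CLAIM (what is proved, stated in full; the proofs are below) =====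
def Claim_equal_eliminar_columna_group_stage : Prop := ∀ (datos_tabla : List (List String)), Dom_eliminar_columna_group_stage datos_tabla → Pre_eliminar_columna_group_stage datos_tabla → Spec_eliminar_columna_group_stage datos_tabla (eliminar_columna_group_stage datos_tabla)

-- ===== LEMMAS AND PROOFS =====

-- when the condition collected into A's index list holds, the row has length ≥ 3,
-- so A's fix-up is plain deletion
theorem pvElimFix_of_cond {row : List String}
    (h : PySem.List.pyGet? row 2 = some "group stage") :
    pvElimFix row = row.eraseIdx 2 := by
  have hlen : 2 < row.length := by
    by_contra hn
    rw [show ((2 : Int)) = ((2 : Nat) : Int) by rfl, PySem.List.pyGet?_natCast] at h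
    simp [List.getElem?_eq_none (by omega : row.length ≤ 2)] at h
  simp [pvElimFix, hlen]

-- the index-filter keeps everything once the running index is past 2
theorem pv_filter_keepAll (l : List String) (s : Int) (hs : 2 < s) :
    (PySem.List.enumerate l s).filterMap
        (fun p => if p.1 ≠ (2 : Int) then some p.2 else none) = l := by
  induction l generalizing s with
  | nil => simp [PySem.List.enumerate_nil]
  | cons x t ih =>
    rw [PySem.List.enumerate_cons, List.filterMap_cons]
    simp only [show s ≠ (2 : Int) from by omega, ne_eq, not_false_eq_true, if_true]
    rw [ih (s + 1) (by omega)]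

-- B's rebuilt row is exactly deletion of index 2 / the row itself
theorem pvSinColumna_of_cond {row : List String}
    (h : PySem.List.pyGet? row 2 = some "group stage") :
    pvSinColumna row = row.eraseIdx 2 := by
  unfold pvSinColumna
  simp only [h, ne_eq, not_true_eq_false, if_false]
  match row with
  | a :: b :: c :: t =>
    rw [PySem.List.enumerate_cons, PySem.List.enumerate_cons, PySem.List.enumerate_cons]
    have hk := pv_filter_keepAll t 3 (by omega)
    simp only [ne_eq, ite_not] at hk
    norm_num [List.filterMap_cons, hk, List.eraseIdx]
  | [] | [_] | [_, _] =>
    rw [show ((2 : Int)) = ((2 : Nat) : Int) by rfl, PySem.List.pyGet?_natCast] at h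
    simp at h

theorem pvSinColumna_of_not_cond {row : List String}
    (h : ¬ PySem.List.pyGet? row 2 = some "group stage") :
    pvSinColumna row = row := by simp [pvSinColumna, h]

-- core invariant: folding A's second loop over the indices collected from `enumerate t s`
-- on a table `pre ++ t` (with s = |pre|) rewrites exactly the rows of `t` by pvSinColumna
theorem pv_fold_eq_map (t pre : List (List String)) :
    ((PySem.List.enumerate t (pre.length : Int)).filterMap
        (fun p => if PySem.List.pyGet? p.2 2 = some "group stage" then some p.1 else none)).foldl
      (fun acc i =>
        match PySem.List.pyGet? acc i with
        | some row => PySem.List.pySetD acc i (pvElimFix row)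
        | none => acc)
      (pre ++ t) = pre ++ t.map pvSinColumna := by
  induction t generalizing pre with
  | nil => simp [PySem.List.enumerate_nil]
  | cons x t ih =>
    rw [PySem.List.enumerate_cons]
    by_cases hc : PySem.List.pyGet? x 2 = some "group stage"
    · have hget : PySem.List.pyGet? (pre ++ x :: t) (pre.length : Int) = some x := by
        rw [PySem.List.pyGet?_natCast]; simp
      have hset : PySem.List.pySetD (pre ++ x :: t) (pre.length : Int) (pvElimFix x)
          = pre ++ pvElimFix x :: t := by
        rw [PySem.List.pySetD_natCast]
        simp [List.set_append_right _ _ (Nat.le_refl _)]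
      simp only [List.filterMap_cons, hc, if_true, List.foldl_cons, hget, hset]
      have hlen : ((pre.length : Int) + 1) = (((pre ++ [pvElimFix x]).length : Nat) : Int) := by
        simp
      have hassoc : pre ++ pvElimFix x :: t = (pre ++ [pvElimFix x]) ++ t := by simp
      rw [hlen, hassoc, ih (pre ++ [pvElimFix x])]
      simp [pvElimFix_of_cond hc, pvSinColumna_of_cond hc]
    · simp only [List.filterMap_cons, hc, if_false]
      have hlen : ((pre.length : Int) + 1) = (((pre ++ [x]).length : Nat) : Int) := by simp
      have hassoc : pre ++ x :: t = (pre ++ [x]) ++ t := by simp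
      rw [hlen, hassoc, ih (pre ++ [x])]
      simp [pvSinColumna_of_not_cond hc]

-- ===== VERDICT (by name: the statement is the Claim_ definition above) =====
theorem eliminar_columna_group_stage_spec : Claim_equal_eliminar_columna_group_stage := by
  intro datos_tabla _ _
  unfold Spec_eliminar_columna_group_stage eliminar_columna_group_stage eliminar_columna_group_stage_alt
  cases datos_tabla with
  | nil => simp [PySem.List.enumerate_nil, PySem.List.slice]
  | cons h t =>
    have hslice : PySem.List.slice (h :: t) (some 1) none = t := by
      rw [show ((1 : Int)) = ((1 : Nat) : Int) by rfl, PySem.List.slice_from_natCast]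
      simp
    have hslice0 : PySem.List.slice (h :: t) none (some 1) = [h] := by
      rw [show ((1 : Int)) = ((1 : Nat) : Int) by rfl, PySem.List.slice_to_natCast]
      simp
    rw [hslice, hslice0]
    have := pv_fold_eq_map t [h]
    simpa using this
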